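-- pv_equiv track=rewrite | github.com/kkr010128/codebert | problem024/problem024_72.py | f
-- ===== SOURCE A (Python) =====
-- def f(p, k, W):
--     i = 0
--     t = 0
--     s = 0
--     while i < len(W) and t < k:
--         if s + W[i] <= p:
--             s += W[i]
--             i += 1
--         else:
--             s = 0
--             t += 1
--     return i
-- ===== SOURCE B (Python) =====
-- def f(p, k, W):
--     n = len(W)
--     # Stage 1: prefix-sum table P, P[j] = W[0]+...+W[j-1]
--     P = [0]
--     t = 0
--     for w in W:
--         t += w
--         P.append(t)
--     # Stage 2: per bin, advance the cursor to the first index whose prefix sum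
--     # exceeds the bin's absolute threshold P[i] + p (no running per-bin sum).
--     i = 0
--     bins = k
--     while bins > 0 and i < n:
--         base = P[i] + p
--         j = i
--         while j < n and P[j + 1] <= base:
--             j += 1
--         if j == i:
--             # oversized item: this bin and every later bin stay empty
--             break
--         i = j
--         bins -= 1
--     return i
-- ===== Notes on version B (the rewrite author's own statement) =====
-- stated objective: alternative
-- what changed: B first builds a prefix-sum table in a separate pass and then fills each bin by comparing absolute prefix sums against the bin's threshold P[i]+p (no per-bin running sum), breaking out as soon as a bin makes no progress instead of burning the remaining k-t bins one iteration at a time.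
import Mathlib
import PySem

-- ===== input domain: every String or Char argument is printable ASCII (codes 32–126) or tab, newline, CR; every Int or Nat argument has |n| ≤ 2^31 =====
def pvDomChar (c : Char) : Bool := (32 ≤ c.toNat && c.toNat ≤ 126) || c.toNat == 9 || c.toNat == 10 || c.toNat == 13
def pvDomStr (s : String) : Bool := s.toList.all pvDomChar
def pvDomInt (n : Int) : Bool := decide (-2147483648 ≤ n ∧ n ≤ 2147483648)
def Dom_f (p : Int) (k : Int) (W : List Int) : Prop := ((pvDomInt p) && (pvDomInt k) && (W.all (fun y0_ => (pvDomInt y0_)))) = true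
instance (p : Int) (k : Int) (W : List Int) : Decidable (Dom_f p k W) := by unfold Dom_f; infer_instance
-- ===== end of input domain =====

-- B replaces A's flat running-sum state machine by two stages: a prefix-sum table built
-- in its own pass, then a bin loop that moves the cursor by absolute-threshold comparison
-- P[j+1] <= P[i]+p and breaks as soon as a bin makes no progress.

-- ===== PORT A =====
-- A's single while loop: i item cursor, t bins used, s current bin sum;
-- each step either consumes an item (fit) or closes a bin (non-fit).
def fLoopA (p : Int) (k : Int) (W : List Int) (i t : Nat) (s : Int) : Nat :=
  if h : i < W.length ∧ (t : Int) < k then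
    if s + W.getD i 0 ≤ p then fLoopA p k W (i + 1) t (s + W.getD i 0)
    else fLoopA p k W i (t + 1) 0
  else i
termination_by (W.length - i) + (k.toNat - t)
decreasing_by
  · omega
  · have : t < k.toNat := by omega
    omega

def f (p : Int) (k : Int) (W : List Int) : Int := fLoopA p k W 0 0 0

-- ===== PORT B =====
-- stage 1 of B: build the prefix-sum table (P = [0]; for w in W: t += w; P.append(t))
def fBuildP : List Int → List Int → Int → List Int
  | [], acc, _ => acc
  | w :: ws, acc, t => fBuildP ws (acc ++ [t + w]) (t + w)

-- inner while of B: advance j while P[j+1] <= base (all indices in range, so getD is exact)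
def fStop (n : Nat) (P : List Int) (base : Int) (j : Nat) : Nat :=
  if _h : j < n ∧ P.getD (j + 1) 0 ≤ base then fStop n P base (j + 1) else j
termination_by n - j
decreasing_by omega

-- outer while of B over the bins, with the no-progress break
def fOuter (p : Int) (n : Nat) (P : List Int) (bins : Int) (i : Nat) : Nat :=
  if h : 0 < bins ∧ i < n then
    let j := fStop n P (P.getD i 0 + p) i
    if j = i then i else fOuter p n P (bins - 1) j
  else i
termination_by bins.toNat
decreasing_by omega

def f_alt (p : Int) (k : Int) (W : List Int) : Int :=
  fOuter p W.length (fBuildP W [0] 0) k 0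

-- ===== PRECONDITION & SPEC =====
def Spec_f (p : Int) (k : Int) (W : List Int) (out : Int) : Prop := out = f_alt p k W
instance (p : Int) (k : Int) (W : List Int) (out : Int) : Decidable (Spec_f p k W out) := by unfold Spec_f; infer_instance

-- ===== CLAIM (what is proved, stated in full; the proofs are below) =====
def Claim_equal_f : Prop := ∀ (p : Int) (k : Int) (W : List Int), Dom_f p k W → Spec_f p k W (f p k W)

-- ===== LEMMAS AND PROOFS =====

-- proof-side bridge: A's inner fill phase with a running bin sum
def fFill (p : Int) (W : List Int) (i : Nat) (s : Int) : Nat :=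
  if h : i < W.length ∧ s + W.getD i 0 ≤ p then fFill p W (i + 1) (s + W.getD i 0) else i
termination_by W.length - i
decreasing_by omega

-- proof-side bridge: the bin-indexed recursion both programs reduce to
def fBins (p : Int) (W : List Int) : Nat → Nat → Nat
  | 0, i => i
  | m + 1, i => if W.length ≤ i then i else fBins p W m (fFill p W i 0)

-- One bin of A's loop: while t < k, A keeps consuming items exactly like fFill;
-- when the fill stops it either (cursor in range) closes the bin, or returns the cursor.
theorem fLoopA_fill (p k : Int) (W : List Int) (i t : Nat) (s : Int)
    (ht : (t : Int) < k) :
    fLoopA p k W i t s =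
      if fFill p W i s < W.length then fLoopA p k W (fFill p W i s) (t + 1) 0
      else fFill p W i s := by
  induction i, s using fFill.induct p W with
  | case1 i s h ih =>
      rw [fLoopA, dif_pos (And.intro h.1 ht), if_pos h.2,
          show fFill p W i s = fFill p W (i + 1) (s + W.getD i 0) from by
            rw [fFill, dif_pos h]]
      exact ih
  | case2 i s h =>
      rw [fFill, dif_neg h, fLoopA]
      by_cases hi : i < W.length
      · have hnf : ¬ (s + W.getD i 0 ≤ p) := by tauto
        rw [dif_pos (And.intro hi ht), if_neg hnf, if_pos hi]
      · rw [dif_neg (by tauto), if_neg hi]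

theorem fBins_ge (p : Int) (W : List Int) (m i : Nat) (h : W.length ≤ i) :
    fBins p W m i = i := by
  cases m with
  | zero => rfl
  | succ m => simp [fBins, h]

theorem fLoopA_eq_fBins (p k : Int) (W : List Int) (m : Nat) :
    ∀ (i t : Nat), k.toNat - t = m → fLoopA p k W i t 0 = fBins p W m i := by
  induction m with
  | zero =>
      intro i t hm
      have hnk : ¬ ((t : Int) < k) := by omega
      rw [fLoopA, dif_neg (by tauto), fBins]
  | succ m ih =>
      intro i t hm
      have htk : (t : Int) < k := by omega
      by_cases hi : W.length ≤ i
      · rw [fLoopA, dif_neg (by omega), fBins, if_pos hi]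
      · rw [fLoopA_fill p k W i t 0 htk, fBins, if_neg hi]
        have hrec := ih (fFill p W i 0) (t + 1) (by omega)
        by_cases hj : fFill p W i 0 < W.length
        · rw [if_pos hj, hrec]
        · rw [if_neg hj, fBins_ge p W m _ (by omega)]

-- B's prefix table unrolled: fBuildP ws acc t = acc ++ running sums of ws starting at t
def fSums (t : Int) : List Int → List Int
  | [] => []
  | w :: ws => (t + w) :: fSums (t + w) ws

theorem fBuildP_eq (ws : List Int) : ∀ (acc : List Int) (t : Int),
    fBuildP ws acc t = acc ++ fSums t ws := by
  induction ws with
  | nil => intro acc t; simp [fBuildP, fSums]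
  | cons w ws ih => intro acc t; simp [fBuildP, fSums, ih]

theorem fSums_getD (ws : List Int) : ∀ (t : Int) (j : Nat), j < ws.length →
    (fSums t ws).getD j 0 = t + (ws.take (j + 1)).sum := by
  induction ws with
  | nil => intro t j h; simp at h
  | cons w ws ih =>
      intro t j h
      cases j with
      | zero => simp [fSums]
      | succ j =>
          simp only [fSums, List.getD_cons_succ, List.take_succ_cons, List.sum_cons]
          rw [ih (t + w) j (by simpa using h)]
          ring

-- the table entry P[j] is the prefix sum of the first j items
theorem fP_getD (W : List Int) (j : Nat) (h : j ≤ W.length) :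
    (fBuildP W [0] 0).getD j 0 = (W.take j).sum := by
  rw [fBuildP_eq]
  cases j with
  | zero => simp
  | succ j =>
      have : ([(0 : Int)] ++ fSums 0 W).getD (j + 1) 0 = (fSums 0 W).getD j 0 := by
        simp
      rw [this, fSums_getD W 0 j (by omega)]
      simp

theorem take_succ_sum (W : List Int) (j : Nat) (h : j < W.length) :
    (W.take (j + 1)).sum = (W.take j).sum + W.getD j 0 := by
  rw [List.sum_take_succ W j h, List.getD_eq_getElem W 0 h]

-- the absolute-threshold scan equals the running-sum fill, via base + s = p + P[j]
theorem fStop_eq_fFill (p : Int) (W : List Int) (base : Int) :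
    ∀ (j : Nat) (s : Int), base + s = p + (W.take j).sum →
      fStop W.length (fBuildP W [0] 0) base j = fFill p W j s := by
  intro j s hb
  induction j, s using fFill.induct p W with
  | case1 j s h ih =>
      have hgd : (fBuildP W [0] 0).getD (j + 1) 0 = (W.take (j + 1)).sum :=
        fP_getD W (j + 1) (by omega)
      have hts := take_succ_sum W j h.1
      rw [fStop, dif_pos ⟨h.1, by rw [hgd, hts]; omega⟩, fFill, dif_pos h]
      exact ih (by rw [hts]; omega)
  | case2 j s h =>
      rw [fFill, dif_neg h, fStop]
      by_cases hj : j < W.length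
      · have hgd : (fBuildP W [0] 0).getD (j + 1) 0 = (W.take (j + 1)).sum :=
          fP_getD W (j + 1) (by omega)
        have hts := take_succ_sum W j hj
        have : ¬ (s + W.getD j 0 ≤ p) := by tauto
        rw [dif_neg (by rw [hgd, hts]; omega)]
      · rw [dif_neg (by tauto)]

-- once a bin makes no progress, fBins never moves the cursor again
theorem fBins_fix (p : Int) (W : List Int) (m i : Nat) (h : fFill p W i 0 = i) :
    fBins p W m i = i := by
  induction m with
  | zero => rfl
  | succ m ih =>
      by_cases hi : W.length ≤ i
      · simp [fBins, hi]
      · simp [fBins, hi, h, ih]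

theorem fOuter_eq_fBins (p : Int) (W : List Int) (m : Nat) :
    ∀ (bins : Int) (i : Nat), bins.toNat = m →
      fOuter p W.length (fBuildP W [0] 0) bins i = fBins p W m i := by
  induction m with
  | zero =>
      intro bins i hm
      rw [fOuter, dif_neg (by omega), fBins]
  | succ m ih =>
      intro bins i hm
      have hb : 0 < bins := by omega
      by_cases hi : i < W.length
      · rw [fOuter, dif_pos ⟨hb, hi⟩]
        have hstop : fStop W.length (fBuildP W [0] 0) ((fBuildP W [0] 0).getD i 0 + p) i
            = fFill p W i 0 := by
          apply fStop_eq_fFill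
          rw [fP_getD W i (by omega)]; ring
        simp only [hstop]
        rw [fBins, if_neg (show ¬ W.length ≤ i by omega)]
        by_cases hfix : fFill p W i 0 = i
        · rw [if_pos hfix, hfix, fBins_fix p W m i hfix]
        · rw [if_neg hfix, ih (bins - 1) _ (by omega)]
      · rw [fOuter, dif_neg (by omega), fBins, if_pos (by omega)]

-- ===== VERDICT (by name: the statement is the Claim_ definition above) =====
theorem f_spec : Claim_equal_f := by
  intro p k W _
  unfold Spec_f f f_alt
  rw [fLoopA_eq_fBins p k W k.toNat 0 0 (by omega),
      fOuter_eq_fBins p W k.toNat k 0 rfl]
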